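-- pv_equiv track=rewrite | github.com/hacaksh/password-analyzer | main.py | has_repeated_unit_seq
-- ===== SOURCE A (Python) =====
-- def has_repeated_unit_seq(s: str, unit_max=4):
--     """
--     Detect repeated unit sequences like '121212', 'ababab', where a unit of length 1..unit_max repeats.
--     """
--     n = len(s)
--     for unit_len in range(1, unit_max + 1):
--         for start in range(0, n - unit_len * 2 + 1):
--             unit = s[start:start + unit_len]
--             i = start
--             count = 0
--             while s[i:i + unit_len] == unit:
--                 count += 1
--                 i += unit_len
--                 if i + unit_len > n:
--                     break
--             if count >= 2 and count * unit_len >= 4: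
--                 return True, unit * count
--     return False, None
-- ===== SOURCE B (Python) =====
-- def has_repeated_unit_seq(s: str, unit_max=4):
--     """
--     Detect repeated unit sequences like '121212', 'ababab', where a unit of length 1..unit_max repeats.
--     Backward DP: rep[i] = number of consecutive copies of s[i:i+L] starting at i.
--     """
--     n = len(s)
--     max_l = min(unit_max, n // 2)
--     for unit_len in range(1, max_l + 1):
--         rep = [1] * n
--         for i in range(n - 2 * unit_len, -1, -1):
--             if s[i:i + unit_len] == s[i + unit_len:i + 2 * unit_len]:
--                 rep[i] = rep[i + unit_len] + 1
--         for start in range(n - 2 * unit_len + 1):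
--             c = rep[start]
--             if c >= 2 and c * unit_len >= 4:
--                 return True, s[start:start + unit_len] * c
--     return False, None
-- ===== Notes on version B (the rewrite author's own statement) =====
-- stated objective: alternative
-- what changed: A re-runs a while-loop from every start position (rescanning the same repeats again and again, quadratic on repeat-heavy strings); B computes, per unit length L, a single backward DP array rep[i] = number of consecutive copies of s[i:i+L] starting at i (rep[i] = rep[i+L]+1 on one block comparison), then finds the first qualifying start in one ordered scan, and skips unit lengths longer than len(s)//2 outright.
import Mathlib
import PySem

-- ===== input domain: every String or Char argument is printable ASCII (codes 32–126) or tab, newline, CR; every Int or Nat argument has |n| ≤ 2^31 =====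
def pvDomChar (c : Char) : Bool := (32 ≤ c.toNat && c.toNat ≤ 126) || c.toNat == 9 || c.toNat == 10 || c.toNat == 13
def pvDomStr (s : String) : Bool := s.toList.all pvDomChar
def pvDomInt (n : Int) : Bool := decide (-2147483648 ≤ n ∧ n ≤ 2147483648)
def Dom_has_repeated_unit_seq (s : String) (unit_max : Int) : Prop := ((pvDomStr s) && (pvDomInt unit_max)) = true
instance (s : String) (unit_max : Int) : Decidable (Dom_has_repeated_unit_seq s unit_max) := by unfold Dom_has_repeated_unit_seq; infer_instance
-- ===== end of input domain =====

-- B replaces A's per-start rescan (while-loop from every start) by one backward DP pass per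
-- unit length (rep[i] = consecutive copies of s[i:i+L] at i) followed by one ordered scan
-- (objective: alternative algorithm; same first-match result).

-- ===== PORT A =====
-- the inner `while` loop of A; fuel (= len(s)+1) only makes the recursion total,
-- it is always sufficient on the calls the port makes
def pvALoop (cs unit : List Char) (L n : Int) : Nat → Int → Int → Int
  | 0, _, count => count
  | fuel + 1, i, count =>
    if PySem.List.slice cs (some i) (some (i + L)) = unit then
      -- count += 1; i += unit_len; if i + unit_len > n: break
      if i + L + L > n then count + 1
      else pvALoop cs unit L n fuel (i + L) (count + 1)
    else count

def has_repeated_unit_seq (s : String) (unit_max : Int) : Bool × Option String :=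
  let cs := s.toList
  let n : Int := PySem.List.len cs
  match (PySem.List.pyRange 1 (unit_max + 1) 1).findSome? (fun L =>
    (PySem.List.pyRange 0 (n - L * 2 + 1) 1).findSome? (fun start =>
      let unit := PySem.List.slice cs (some start) (some (start + L))
      let count := pvALoop cs unit L n (cs.length + 1) start 0
      if 2 ≤ count ∧ 4 ≤ count * L then
        some (true, some (String.ofList (PySem.List.pyRepeat unit count)))
      else none)) with
  | some r => r
  | none => (false, none)

-- ===== PORT B =====
def has_repeated_unit_seq_alt (s : String) (unit_max : Int) : Bool × Option String :=
  let cs := s.toList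
  let n : Int := PySem.List.len cs
  let maxL : Int := min unit_max (PySem.Int.floordiv n 2)
  match (PySem.List.pyRange 1 (maxL + 1) 1).findSome? (fun L =>
    let rep := (PySem.List.pyRange (n - 2 * L) (-1) (-1)).foldl (fun rep i =>
      if PySem.List.slice cs (some i) (some (i + L)) =
         PySem.List.slice cs (some (i + L)) (some (i + 2 * L)) then
        PySem.List.pySetD rep i (PySem.List.pyGetD rep (i + L) 1 + 1)
      else rep) (List.replicate cs.length (1 : Int))
    (PySem.List.pyRange 0 (n - 2 * L + 1) 1).findSome? (fun start =>
      let c := PySem.List.pyGetD rep start 1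
      if 2 ≤ c ∧ 4 ≤ c * L then
        some (true, some (String.ofList (PySem.List.pyRepeat
          (PySem.List.slice cs (some start) (some (start + L))) c)))
      else none)) with
  | some r => r
  | none => (false, none)

-- ===== PRECONDITION & SPEC =====
def Spec_has_repeated_unit_seq (s : String) (unit_max : Int) (out : Bool × Option String) : Prop := out = has_repeated_unit_seq_alt s unit_max
instance (s : String) (unit_max : Int) (out : Bool × Option String) : Decidable (Spec_has_repeated_unit_seq s unit_max out) := by unfold Spec_has_repeated_unit_seq; infer_instance

-- ===== CLAIM (what is proved, stated in full; the proofs are below) =====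
def Claim_equal_has_repeated_unit_seq : Prop := ∀ (s : String) (unit_max : Int), Dom_has_repeated_unit_seq s unit_max → Spec_has_repeated_unit_seq s unit_max (has_repeated_unit_seq s unit_max)

-- ===== LEMMAS AND PROOFS =====

-- B's rep-array recurrence as a recursive function (proof-side only).
def pvRepF (cs : List Char) (L : Int) : Nat → Int → Int
  | 0, _ => 1
  | f + 1, i =>
    if i + 2 * L ≤ (cs.length : Int) ∧
       PySem.List.slice cs (some i) (some (i + L)) =
       PySem.List.slice cs (some (i + L)) (some (i + 2 * L))
    then pvRepF cs L f (i + L) + 1 else 1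

lemma pvRepF_fuel (cs : List Char) (L : Int) (hL : 1 ≤ L) :
    ∀ (f1 f2 : Nat) (i : Int), (cs.length : Int) < i + L * f1 → (cs.length : Int) < i + L * f2 →
      pvRepF cs L f1 i = pvRepF cs L f2 i := by
  intro f1
  induction f1 with
  | zero =>
    intro f2 i h1 h2
    cases f2 with
    | zero => rfl
    | succ g =>
      simp only [pvRepF]
      rw [if_neg]
      rintro ⟨hc, -⟩
      simp only [Nat.cast_zero, mul_zero] at h1
      omega
  | succ f ih =>
    intro f2 i h1 h2
    cases f2 with
    | zero =>
      simp only [pvRepF]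
      rw [if_neg]
      rintro ⟨hc, -⟩
      simp only [Nat.cast_zero, mul_zero] at h2
      omega
    | succ g =>
      simp only [pvRepF]
      by_cases hc : i + 2 * L ≤ (cs.length : Int) ∧
          PySem.List.slice cs (some i) (some (i + L)) =
          PySem.List.slice cs (some (i + L)) (some (i + 2 * L))
      · rw [if_pos hc, if_pos hc, ih g (i + L) (by push_cast at h1 ⊢; nlinarith) (by push_cast at h2 ⊢; nlinarith)]
      · rw [if_neg hc, if_neg hc]

lemma pvALoop_eq (cs unit : List Char) (L : Int) (hL : 1 ≤ L) :
    ∀ (f fr : Nat) (i c : Int), (cs.length : Int) < i + L * f → (cs.length : Int) < i + L * fr →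
      i + L ≤ (cs.length : Int) →
      PySem.List.slice cs (some i) (some (i + L)) = unit →
      pvALoop cs unit L (cs.length : Int) f i c = c + pvRepF cs L fr i := by
  intro f
  induction f with
  | zero =>
    intro fr i c h1 h2 hin hs
    exfalso
    simp only [Nat.cast_zero, mul_zero] at h1
    omega
  | succ f ih =>
    intro fr i c h1 h2 hin hs
    simp only [pvALoop, if_pos hs]
    push_cast at h1 h2
    by_cases hbr : i + L + L > (cs.length : Int)
    · rw [if_pos hbr]
      cases fr with
      | zero => exfalso; omega
      | succ g =>
        have hneg : ¬(i + 2 * L ≤ (cs.length : Int) ∧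
            PySem.List.slice cs (some i) (some (i + L)) =
            PySem.List.slice cs (some (i + L)) (some (i + 2 * L))) := by
          rintro ⟨hc, -⟩; omega
        simp only [pvRepF, if_neg hneg]
    · rw [if_neg hbr]
      rw [not_lt] at hbr
      cases fr with
      | zero => exfalso; omega
      | succ g =>
        push_cast at h2
        have h2L : i + 2 * L = i + L + L := by ring
        by_cases hs2 : PySem.List.slice cs (some (i + L)) (some (i + L + L)) = unit
        · have hpos : i + 2 * L ≤ (cs.length : Int) ∧
              PySem.List.slice cs (some i) (some (i + L)) =
              PySem.List.slice cs (some (i + L)) (some (i + 2 * L)) := by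
            constructor
            · omega
            · rw [h2L, hs, hs2]
          simp only [pvRepF, if_pos hpos]
          have hrec := ih g (i + L) (c + 1)
              (by nlinarith) (by nlinarith)
              (by omega) hs2
          rw [hrec]
          ring
        · have hneg : ¬(i + 2 * L ≤ (cs.length : Int) ∧
              PySem.List.slice cs (some i) (some (i + L)) =
              PySem.List.slice cs (some (i + L)) (some (i + 2 * L))) := by
            rintro ⟨-, he⟩
            rw [h2L, hs] at he
            exact hs2 he.symm
          simp only [pvRepF, if_neg hneg]
          cases f with
          | zero => simp only [pvALoop]
          | succ h => simp only [pvALoop, if_neg hs2]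

lemma pvRepF_unfold (cs : List Char) (L : Int) (hL : 1 ≤ L) (i : Int) (h0 : 0 ≤ i) :
    pvRepF cs L (cs.length + 1) i =
      if i + 2 * L ≤ (cs.length : Int) ∧
         PySem.List.slice cs (some i) (some (i + L)) =
         PySem.List.slice cs (some (i + L)) (some (i + 2 * L))
      then pvRepF cs L (cs.length + 1) (i + L) + 1 else 1 := by
  conv_lhs => rw [pvRepF]
  by_cases hc : i + 2 * L ≤ (cs.length : Int) ∧
      PySem.List.slice cs (some i) (some (i + L)) =
      PySem.List.slice cs (some (i + L)) (some (i + 2 * L))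
  · rw [if_pos hc, if_pos hc]
    congr 1
    exact pvRepF_fuel cs L hL cs.length (cs.length + 1) (i + L)
      (by nlinarith) (by push_cast; nlinarith)
  · rw [if_neg hc, if_neg hc]

def pvInv (cs : List Char) (L : Int) (j : Int) (r : List Int) : Prop :=
  r.length = cs.length ∧
  ∀ k : Nat, k < cs.length →
    PySem.List.pyGetD r (k : Int) 1 =
      if j ≤ (k : Int) then pvRepF cs L (cs.length + 1) (k : Int) else 1

lemma pvFold_inv (cs : List Char) (L : Int) (hL : 1 ≤ L) :
    ∀ (m : Nat) (a : Int), a + 1 = (m : Int) → a ≤ (cs.length : Int) - 2 * L →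
      ∀ r : List Int, pvInv cs L (a + 1) r →
      pvInv cs L 0 ((PySem.List.pyRange a (-1) (-1)).foldl (fun rep i =>
        if PySem.List.slice cs (some i) (some (i + L)) =
           PySem.List.slice cs (some (i + L)) (some (i + 2 * L)) then
          PySem.List.pySetD rep i (PySem.List.pyGetD rep (i + L) 1 + 1)
        else rep) r) := by
  intro m
  induction m with
  | zero =>
    intro a ha hle r hr
    have ha' : a = -1 := by omega
    subst ha'
    rw [PySem.List.pyRange_neg_one_eq_nil (by omega)]
    simpa using hr
  | succ m ih =>
    intro a ha hle r hr
    have ha0 : 0 ≤ a := by omega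
    rw [PySem.List.pyRange_neg_one_cons (by omega)]
    simp only [List.foldl_cons]
    apply ih (a - 1) (by omega) (by omega)
    -- show pvInv cs L (a - 1 + 1) (step r a)
    have hlen := hr.1
    have hent := hr.2
    have hnlen : a < (r.length : Int) := by
      rw [hlen]; omega
    by_cases hc : PySem.List.slice cs (some a) (some (a + L)) =
        PySem.List.slice cs (some (a + L)) (some (a + 2 * L))
    · rw [if_pos hc]
      constructor
      · rw [PySem.List.length_pySetD, hlen]
      · intro k hk
        rw [show PySem.List.pySetD r a (PySem.List.pyGetD r (a + L) 1 + 1) =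
            PySem.List.pySetD r ((a.toNat : Nat) : Int) (PySem.List.pyGetD r (a + L) 1 + 1) from by
          rw [Int.toNat_of_nonneg ha0]]
        rw [PySem.List.pyGetD_pySetD_natCast r a.toNat k _ 1 (by omega)]
        by_cases hka : (k : Int) = a
        · -- updated entry
          rw [if_pos (by omega)]
          -- value = pyGetD r (a+L) 1 + 1 ; want = pvRepF (len+1) a
          have hAL : (0:Int) ≤ a + L := by omega
          have hALlt : a + L < (cs.length : Int) := by omega
          have hget : PySem.List.pyGetD r (a + L) 1 =
              pvRepF cs L (cs.length + 1) (a + L) := by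
            have := hent (a + L).toNat (by omega)
            rw [Int.toNat_of_nonneg hAL] at this
            rw [this, if_pos (by omega)]
          rw [hget, if_pos (by omega), hka,
              pvRepF_unfold cs L hL a ha0, if_pos ⟨by omega, hc⟩]
        · -- untouched entry
          rw [if_neg (by omega)]
          rw [hent k hk]
          by_cases hak : a ≤ (k : Int)
          · rw [if_pos (by omega), if_pos (by omega)]
          · rw [if_neg (by omega), if_neg (by omega)]
    · rw [if_neg hc]
      constructor
      · exact hlen
      · intro k hk
        rw [hent k hk]
        by_cases hka : (k : Int) = a
        · rw [if_neg (by omega), if_pos (by omega), hka,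
              pvRepF_unfold cs L hL a ha0,
              if_neg (by rintro ⟨-, h2⟩; exact hc h2)]
        · by_cases hak : a ≤ (k : Int)
          · rw [if_pos (by omega), if_pos (by omega)]
          · rw [if_neg (by omega), if_neg (by omega)]

lemma pvFindSome?_congr {α β : Type} (l : List α) (f g : α → Option β)
    (h : ∀ x ∈ l, f x = g x) : l.findSome? f = l.findSome? g := by
  induction l with
  | nil => rfl
  | cons x xs ih =>
    simp only [List.findSome?_cons, h x (by simp)]
    cases g x with
    | some v => rfl
    | none => exact ih fun y hy => h y (by simp [hy])

lemma pvMain (cs : List Char) (unit_max : Int) :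
    (PySem.List.pyRange 1 (unit_max + 1) 1).findSome? (fun L =>
      (PySem.List.pyRange 0 ((cs.length : Int) - L * 2 + 1) 1).findSome? (fun start =>
        if 2 ≤ pvALoop cs (PySem.List.slice cs (some start) (some (start + L))) L
                  ((cs.length : Int)) (cs.length + 1) start 0 ∧
           4 ≤ pvALoop cs (PySem.List.slice cs (some start) (some (start + L))) L
                  ((cs.length : Int)) (cs.length + 1) start 0 * L then
          some (true, some (String.ofList (PySem.List.pyRepeat
            (PySem.List.slice cs (some start) (some (start + L)))
            (pvALoop cs (PySem.List.slice cs (some start) (some (start + L))) L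
              ((cs.length : Int)) (cs.length + 1) start 0))))
        else none)) =
    (PySem.List.pyRange 1 (min unit_max (PySem.Int.floordiv (cs.length : Int) 2) + 1) 1).findSome? (fun L =>
      (PySem.List.pyRange 0 ((cs.length : Int) - 2 * L + 1) 1).findSome? (fun start =>
        if 2 ≤ PySem.List.pyGetD ((PySem.List.pyRange ((cs.length : Int) - 2 * L) (-1) (-1)).foldl
                  (fun rep i =>
                    if PySem.List.slice cs (some i) (some (i + L)) =
                       PySem.List.slice cs (some (i + L)) (some (i + 2 * L)) then
                      PySem.List.pySetD rep i (PySem.List.pyGetD rep (i + L) 1 + 1)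
                    else rep) (List.replicate cs.length (1 : Int))) start 1 ∧
           4 ≤ PySem.List.pyGetD ((PySem.List.pyRange ((cs.length : Int) - 2 * L) (-1) (-1)).foldl
                  (fun rep i =>
                    if PySem.List.slice cs (some i) (some (i + L)) =
                       PySem.List.slice cs (some (i + L)) (some (i + 2 * L)) then
                      PySem.List.pySetD rep i (PySem.List.pyGetD rep (i + L) 1 + 1)
                    else rep) (List.replicate cs.length (1 : Int))) start 1 * L then
          some (true, some (String.ofList (PySem.List.pyRepeat
            (PySem.List.slice cs (some start) (some (start + L)))
            (PySem.List.pyGetD ((PySem.List.pyRange ((cs.length : Int) - 2 * L) (-1) (-1)).foldl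
              (fun rep i =>
                if PySem.List.slice cs (some i) (some (i + L)) =
                   PySem.List.slice cs (some (i + L)) (some (i + 2 * L)) then
                  PySem.List.pySetD rep i (PySem.List.pyGetD rep (i + L) 1 + 1)
                else rep) (List.replicate cs.length (1 : Int))) start 1))))
        else none)) := by
  have hfd : PySem.Int.floordiv (cs.length : Int) 2 = (cs.length : Int) / 2 :=
    PySem.Int.floordiv_eq_ediv_of_pos (by omega)
  by_cases hum : unit_max ≤ 0
  · rw [PySem.List.pyRange_one_eq_nil (by omega),
        PySem.List.pyRange_one_eq_nil (by rw [hfd]; omega)]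
    rfl
  · rw [PySem.List.pyRange_one_append 1 (min unit_max (PySem.Int.floordiv (cs.length : Int) 2) + 1)
        (unit_max + 1) (by rw [hfd]; omega) (by rw [hfd]; omega),
      List.findSome?_append]
    have htail : (PySem.List.pyRange (min unit_max (PySem.Int.floordiv (cs.length : Int) 2) + 1)
        (unit_max + 1) 1).findSome? (fun L =>
      (PySem.List.pyRange 0 ((cs.length : Int) - L * 2 + 1) 1).findSome? (fun start =>
        if 2 ≤ pvALoop cs (PySem.List.slice cs (some start) (some (start + L))) L
                  ((cs.length : Int)) (cs.length + 1) start 0 ∧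
           4 ≤ pvALoop cs (PySem.List.slice cs (some start) (some (start + L))) L
                  ((cs.length : Int)) (cs.length + 1) start 0 * L then
          some (true, some (String.ofList (PySem.List.pyRepeat
            (PySem.List.slice cs (some start) (some (start + L)))
            (pvALoop cs (PySem.List.slice cs (some start) (some (start + L))) L
              ((cs.length : Int)) (cs.length + 1) start 0))))
        else none)) = none := by
      rw [List.findSome?_eq_none_iff]
      intro L hLmem
      rw [PySem.List.mem_pyRange_one] at hLmem
      rw [PySem.List.pyRange_one_eq_nil (by rw [hfd] at hLmem; omega)]
      rfl
    rw [htail]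
    rw [Option.or_none]
    apply pvFindSome?_congr
    intro L hLmem
    rw [PySem.List.mem_pyRange_one] at hLmem
    have hL : 1 ≤ L := hLmem.1
    have hLle : 2 * L ≤ (cs.length : Int) := by rw [hfd] at hLmem; omega
    rw [show (cs.length : Int) - L * 2 + 1 = (cs.length : Int) - 2 * L + 1 from by ring]
    apply pvFindSome?_congr
    intro start hsmem
    rw [PySem.List.mem_pyRange_one] at hsmem
    have hs0 : 0 ≤ start := hsmem.1
    have hsle : start ≤ (cs.length : Int) - 2 * L := by omega
    have hcount : pvALoop cs (PySem.List.slice cs (some start) (some (start + L))) L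
        ((cs.length : Int)) (cs.length + 1) start 0 =
        pvRepF cs L (cs.length + 1) start := by
      rw [pvALoop_eq cs _ L hL (cs.length + 1) (cs.length + 1) start 0
        (by push_cast; nlinarith) (by push_cast; nlinarith) (by omega) rfl]
      ring
    have hrep : PySem.List.pyGetD ((PySem.List.pyRange ((cs.length : Int) - 2 * L) (-1) (-1)).foldl
          (fun rep i =>
            if PySem.List.slice cs (some i) (some (i + L)) =
               PySem.List.slice cs (some (i + L)) (some (i + 2 * L)) then
              PySem.List.pySetD rep i (PySem.List.pyGetD rep (i + L) 1 + 1)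
            else rep) (List.replicate cs.length (1 : Int))) start 1 =
        pvRepF cs L (cs.length + 1) start := by
      have hinv0 : pvInv cs L ((cs.length : Int) - 2 * L + 1) (List.replicate cs.length (1 : Int)) := by
        constructor
        · exact List.length_replicate
        · intro k hk
          rw [PySem.List.pyGetD_natCast, List.getD_replicate _ (by omega)]
          by_cases hik : (cs.length : Int) - 2 * L + 1 ≤ (k : Int)
          · rw [if_pos hik, pvRepF_unfold cs L hL (k : Int) (by omega), if_neg (by rintro ⟨h1, -⟩; omega)]
          · rw [if_neg hik]
      have hinv := pvFold_inv cs L hL ((cs.length : Int) - 2 * L + 1).toNat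
        ((cs.length : Int) - 2 * L) (by omega) (le_refl _) (List.replicate cs.length (1 : Int)) hinv0
      have := hinv.2 start.toNat (by omega)
      rw [Int.toNat_of_nonneg hs0] at this
      rw [this, if_pos hs0]
    simp only [hcount, hrep]

-- ===== VERDICT (by name: the statement is the Claim_ definition above) =====
theorem has_repeated_unit_seq_spec : Claim_equal_has_repeated_unit_seq := by
  intro s unit_max _h
  unfold Spec_has_repeated_unit_seq has_repeated_unit_seq has_repeated_unit_seq_alt
  simp only [PySem.List.len_eq]
  rw [pvMain s.toList unit_max]
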